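-- pv_equiv track=rewrite | github.com/aasi-archive/bhagavad-gita | gita2html.py | ReplaceEnglishWithTamilNumbers
-- ===== SOURCE A (Python) =====
-- def ReplaceEnglishWithTamilNumbers(text):
--     nummap = {  "1": "௧",
--                 "2": "௨",
--                 "3": "௩",
--                 "4": "௪",
--                 "5": "௫",
--                 "6": "௬",
--                 "7": "௭",
--                 "8": "௮",
--                 "9": "௯",
--                 "0": "०"
--             }
--     for num in nummap:
--         text = text.replace(num, nummap[num])
--     return text
-- ===== SOURCE B (Python) =====
-- def ReplaceEnglishWithTamilNumbers(text):
--     # No dict at all: the ten numerals in a tuple indexed by the digit's value,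
--     # selected by character arithmetic in a single pass.
--     numerals = ("०", "௧", "௨", "௩", "௪", "௫", "௬", "௭", "௮", "௯")
--     out = []
--     for c in text:
--         if '0' <= c <= '9':
--             out.append(numerals[ord(c) - ord('0')])
--         else:
--             out.append(c)
--     return ''.join(out)
-- ===== Notes on version B (the rewrite author's own statement) =====
-- stated objective: alternative
-- what changed: B drops the dict and the ten whole-string replace() scans entirely: one pass over the characters, mapping each digit to a numeral tuple indexed by the digit's value and copying every other character, then joining.
import Mathlib
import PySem

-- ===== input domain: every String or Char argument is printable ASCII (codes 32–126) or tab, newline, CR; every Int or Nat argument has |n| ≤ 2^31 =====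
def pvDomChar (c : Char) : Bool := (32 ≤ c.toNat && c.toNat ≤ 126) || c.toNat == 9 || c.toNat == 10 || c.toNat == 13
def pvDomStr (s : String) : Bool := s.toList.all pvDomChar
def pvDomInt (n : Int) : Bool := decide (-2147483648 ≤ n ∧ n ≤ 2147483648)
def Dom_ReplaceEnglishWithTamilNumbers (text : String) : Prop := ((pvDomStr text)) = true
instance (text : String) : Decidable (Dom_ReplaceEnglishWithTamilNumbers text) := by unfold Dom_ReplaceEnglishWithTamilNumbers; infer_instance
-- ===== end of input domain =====

-- B drops the dict and the ten whole-string replace() scans: one pass over the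
-- characters, indexing a numeral table by ord(c)-ord('0') for digits (same output).

-- ===== PORT A =====
def pvNummapA : PySem.Dict String String :=
  PySem.Dict.ofList [("1", "௧"), ("2", "௨"), ("3", "௩"), ("4", "௪"), ("5", "௫"),
                     ("6", "௬"), ("7", "௭"), ("8", "௮"), ("9", "௯"), ("0", "०")]

-- 'for num in nummap: text = text.replace(num, nummap[num])'; nummap[num] is a
-- present-key subscript (num comes from the dict's own keys), ported as getD with
-- an unreachable default.
def ReplaceEnglishWithTamilNumbers (text : String) : String :=
  pvNummapA.keys.foldl (fun t num => PySem.Str.replace t num (pvNummapA.getD num num)) text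

-- ===== PORT B =====
-- numerals = ("०", "௧", …, "௯"), value-indexed
def pvNumerals : List String := ["०", "௧", "௨", "௩", "௪", "௫", "௬", "௭", "௮", "௯"]

-- loop appending to out, then ''.join(out); numerals[ord(c)-ord('0')] is an
-- in-range subscript (the branch guarantees 0 ≤ ord(c)-48 ≤ 9), ported as getD
-- with an unreachable default; iterating a str yields one-character strings.
def ReplaceEnglishWithTamilNumbers_alt (text : String) : String :=
  PySem.Str.join ""
    (text.toList.foldl (fun out c =>
      if '0' ≤ c ∧ c ≤ '9' then
        out ++ [pvNumerals.getD (c.toNat - '0'.toNat) (String.ofList [c])]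
      else
        out ++ [String.ofList [c]]) [])

-- ===== PRECONDITION & SPEC =====
def Spec_ReplaceEnglishWithTamilNumbers (text : String) (out : String) : Prop := out = ReplaceEnglishWithTamilNumbers_alt text
instance (text : String) (out : String) : Decidable (Spec_ReplaceEnglishWithTamilNumbers text out) := by unfold Spec_ReplaceEnglishWithTamilNumbers; infer_instance

-- ===== CLAIM (what is proved, stated in full; the proofs are below) =====
def Claim_equal_ReplaceEnglishWithTamilNumbers : Prop := ∀ (text : String), Dom_ReplaceEnglishWithTamilNumbers text → Spec_ReplaceEnglishWithTamilNumbers text (ReplaceEnglishWithTamilNumbers text)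

-- ===== LEMMAS AND PROOFS =====

-- the one-character substitution a single replace(num, …) performs
def pvSub (d t c : Char) : Char := if c = d then t else c

-- the composed substitution both programs compute, as one nested if
def pvG (c : Char) : Char :=
  if c = '1' then '௧' else if c = '2' then '௨' else if c = '3' then '௩' else
  if c = '4' then '௪' else if c = '5' then '௫' else if c = '6' then '௬' else
  if c = '7' then '௭' else if c = '8' then '௮' else if c = '9' then '௯' else
  if c = '0' then '०' else c

theorem pv_go_single (d : Char) (new : List Char) :
    ∀ (fuel : Nat) (l acc : List Char), l.length ≤ fuel →
      PySem.Chars.replace.go [d] new fuel l acc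
        = acc.reverse ++ l.flatMap (fun c => if c = d then new else [c]) := by
  intro fuel
  induction fuel with
  | zero =>
    intro l acc h
    have : l = [] := List.eq_nil_of_length_eq_zero (Nat.le_zero.mp h)
    subst this; simp [PySem.Chars.replace.go]
  | succ n ih =>
    intro l acc h
    cases l with
    | nil => simp [PySem.Chars.replace.go]
    | cons c t =>
      simp only [PySem.Chars.replace.go, List.isPrefixOf, Bool.and_true]
      by_cases hc : d = c
      · subst hc
        rw [if_pos (by simp)]
        rw [show List.drop [d].length (d :: t) = t from rfl]
        rw [ih t (new.reverse ++ acc) (by simpa using Nat.le_of_succ_le_succ h)]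
        simp
      · rw [if_neg (by simp [hc])]
        rw [ih t (c :: acc) (by simpa using Nat.le_of_succ_le_succ h)]
        simp [Ne.symm hc]

theorem pv_flatMap_single {α β : Type} (f : α → β) (l : List α) :
    l.flatMap (fun c => [f c]) = l.map f := by
  induction l with
  | nil => rfl
  | cons a t ih => simp [ih]

theorem pv_replace_single (d t : Char) (s : List Char) :
    PySem.Chars.replace s [d] [t] = s.map (pvSub d t) := by
  unfold PySem.Chars.replace
  rw [if_neg (by simp)]
  rw [pv_go_single d [t] s.length s [] (le_refl _)]
  have : (fun c => if c = d then [t] else [c]) = (fun c => [pvSub d t c]) := by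
    funext c; unfold pvSub; split <;> rfl
  simp [this, pv_flatMap_single]

-- composing A's ten substitutions equals the single lookup function
theorem pv_comp_eq (c : Char) :
    pvSub '0' '०' (pvSub '9' '௯' (pvSub '8' '௮' (pvSub '7' '௭' (pvSub '6' '௬'
      (pvSub '5' '௫' (pvSub '4' '௪' (pvSub '3' '௩' (pvSub '2' '௨'
        (pvSub '1' '௧' c))))))))) = pvG c := by
  by_cases h1 : c = '1'; · subst h1; decide
  by_cases h2 : c = '2'; · subst h2; decide
  by_cases h3 : c = '3'; · subst h3; decide
  by_cases h4 : c = '4'; · subst h4; decide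
  by_cases h5 : c = '5'; · subst h5; decide
  by_cases h6 : c = '6'; · subst h6; decide
  by_cases h7 : c = '7'; · subst h7; decide
  by_cases h8 : c = '8'; · subst h8; decide
  by_cases h9 : c = '9'; · subst h9; decide
  by_cases h0 : c = '0'; · subst h0; decide
  simp [pvSub, pvG, h1, h2, h3, h4, h5, h6, h7, h8, h9, h0]

set_option maxHeartbeats 1600000 in
theorem pv_A_toList (text : String) :
    (ReplaceEnglishWithTamilNumbers text).toList = text.toList.map pvG := by
  have hkeys : pvNummapA.keys = ["1", "2", "3", "4", "5", "6", "7", "8", "9", "0"] := by decide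
  unfold ReplaceEnglishWithTamilNumbers
  rw [hkeys]
  simp only [List.foldl,
    show pvNummapA.getD "1" "1" = "௧" from by decide,
    show pvNummapA.getD "2" "2" = "௨" from by decide,
    show pvNummapA.getD "3" "3" = "௩" from by decide,
    show pvNummapA.getD "4" "4" = "௪" from by decide,
    show pvNummapA.getD "5" "5" = "௫" from by decide,
    show pvNummapA.getD "6" "6" = "௬" from by decide,
    show pvNummapA.getD "7" "7" = "௭" from by decide,
    show pvNummapA.getD "8" "8" = "௮" from by decide,
    show pvNummapA.getD "9" "9" = "௯" from by decide,
    show pvNummapA.getD "0" "0" = "०" from by decide]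
  simp only [PySem.Str.toList_replace,
    show ("1" : String).toList = ['1'] from rfl, show ("௧" : String).toList = ['௧'] from rfl,
    show ("2" : String).toList = ['2'] from rfl, show ("௨" : String).toList = ['௨'] from rfl,
    show ("3" : String).toList = ['3'] from rfl, show ("௩" : String).toList = ['௩'] from rfl,
    show ("4" : String).toList = ['4'] from rfl, show ("௪" : String).toList = ['௪'] from rfl,
    show ("5" : String).toList = ['5'] from rfl, show ("௫" : String).toList = ['௫'] from rfl,
    show ("6" : String).toList = ['6'] from rfl, show ("௬" : String).toList = ['௬'] from rfl,
    show ("7" : String).toList = ['7'] from rfl, show ("௭" : String).toList = ['௭'] from rfl,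
    show ("8" : String).toList = ['8'] from rfl, show ("௮" : String).toList = ['௮'] from rfl,
    show ("9" : String).toList = ['9'] from rfl, show ("௯" : String).toList = ['௯'] from rfl,
    show ("0" : String).toList = ['0'] from rfl, show ("०" : String).toList = ['०'] from rfl]
  simp only [pv_replace_single, List.map_map]
  refine List.map_congr_left (fun c _ => ?_)
  simpa [Function.comp] using pv_comp_eq c

-- B's per-character emitted string
def pvF (c : Char) : String :=
  if '0' ≤ c ∧ c ≤ '9' then pvNumerals.getD (c.toNat - '0'.toNat) (String.ofList [c])
  else String.ofList [c]

theorem pv_foldl_append (f : Char → String) :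
    ∀ (l : List Char) (acc : List String),
      l.foldl (fun out c => out ++ [f c]) acc = acc ++ l.map f := by
  intro l
  induction l with
  | nil => simp
  | cons a t ih => intro acc; simp [List.foldl, ih]

theorem pv_toNat_ne (c d : Char) (h : c ≠ d) : c.toNat ≠ d.toNat := by
  intro hn
  exact h (Char.ext (UInt32.toNat_inj.mp hn))

theorem pvF_toList (c : Char) : (pvF c).toList = [pvG c] := by
  by_cases h1 : c = '1'; · subst h1; decide
  by_cases h2 : c = '2'; · subst h2; decide
  by_cases h3 : c = '3'; · subst h3; decide
  by_cases h4 : c = '4'; · subst h4; decide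
  by_cases h5 : c = '5'; · subst h5; decide
  by_cases h6 : c = '6'; · subst h6; decide
  by_cases h7 : c = '7'; · subst h7; decide
  by_cases h8 : c = '8'; · subst h8; decide
  by_cases h9 : c = '9'; · subst h9; decide
  by_cases h0 : c = '0'; · subst h0; decide
  have hnd : ¬ ('0' ≤ c ∧ c ≤ '9') := by
    rintro ⟨hl, hr⟩
    have hl' : (48 : Nat) ≤ c.toNat := UInt32.le_iff_toNat_le.mp hl
    have hr' : c.toNat ≤ 57 := UInt32.le_iff_toNat_le.mp hr
    have n0 : c.toNat ≠ 48 := pv_toNat_ne c '0' h0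
    have n1 : c.toNat ≠ 49 := pv_toNat_ne c '1' h1
    have n2 : c.toNat ≠ 50 := pv_toNat_ne c '2' h2
    have n3 : c.toNat ≠ 51 := pv_toNat_ne c '3' h3
    have n4 : c.toNat ≠ 52 := pv_toNat_ne c '4' h4
    have n5 : c.toNat ≠ 53 := pv_toNat_ne c '5' h5
    have n6 : c.toNat ≠ 54 := pv_toNat_ne c '6' h6
    have n7 : c.toNat ≠ 55 := pv_toNat_ne c '7' h7
    have n8 : c.toNat ≠ 56 := pv_toNat_ne c '8' h8
    have n9 : c.toNat ≠ 57 := pv_toNat_ne c '9' h9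
    omega
  simp [pvF, pvG, hnd, h1, h2, h3, h4, h5, h6, h7, h8, h9, h0]

theorem pv_B_toList (text : String) :
    (ReplaceEnglishWithTamilNumbers_alt text).toList = text.toList.map pvG := by
  unfold ReplaceEnglishWithTamilNumbers_alt
  rw [show (fun (out : List String) (c : Char) =>
        if '0' ≤ c ∧ c ≤ '9' then
          out ++ [pvNumerals.getD (c.toNat - '0'.toNat) (String.ofList [c])]
        else out ++ [String.ofList [c]])
      = (fun out c => out ++ [pvF c]) from by
    funext out c; unfold pvF; split <;> rfl]
  rw [pv_foldl_append, List.nil_append, PySem.Str.toList_join]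
  simp only [List.map_map, Function.comp_def, pvF_toList]
  have : ("" : String).toList = [] := rfl
  rw [this, show (fun c => [pvG c]) = ((fun c => [c]) ∘ pvG) from rfl, ← List.map_map,
    PySem.Chars.join_nil_singletons]

-- ===== VERDICT (by name: the statement is the Claim_ definition above) =====
theorem ReplaceEnglishWithTamilNumbers_spec : Claim_equal_ReplaceEnglishWithTamilNumbers := by
  intro text _
  unfold Spec_ReplaceEnglishWithTamilNumbers
  have h := (pv_A_toList text).trans (pv_B_toList text).symm
  have := congrArg String.ofList h
  simpa using this
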